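-- pv_equiv track=rewrite | github.com/BehroozMirmolavi-GLA/adventofcode2019 | adventofcode2019.py | digitgroup
-- ===== SOURCE A (Python) =====
-- def digitgroup(num):
--     number_str = str(num)
--     last_digit = number_str[0]
--     group_len = 1
--     for digit in number_str[1:]:
--         if digit == last_digit:
--             group_len += 1
--         else:
--             if group_len == 2:
--                 return True
--             last_digit = digit
--             group_len = 1
--     return group_len == 2
-- ===== SOURCE B (Python) =====
-- def _run_lengths(s):
--     # split s into maximal runs of equal characters, return their lengths
--     if not s:
--         return []
--     i = 0
--     while i < len(s) and s[i] == s[0]: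
--         i += 1
--     return [i] + _run_lengths(s[i:])
--
--
-- def digitgroup(num):
--     return 2 in _run_lengths(str(num))
-- ===== Notes on version B (the rewrite author's own statement) =====
-- stated objective: alternative
-- what changed: B first splits str(num) into maximal runs of equal characters (a recursive group-then-test pass) and then checks whether a length-two run occurs among the run lengths, instead of A's single stateful scan carrying last_digit/group_len with an early return.
import Mathlib
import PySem

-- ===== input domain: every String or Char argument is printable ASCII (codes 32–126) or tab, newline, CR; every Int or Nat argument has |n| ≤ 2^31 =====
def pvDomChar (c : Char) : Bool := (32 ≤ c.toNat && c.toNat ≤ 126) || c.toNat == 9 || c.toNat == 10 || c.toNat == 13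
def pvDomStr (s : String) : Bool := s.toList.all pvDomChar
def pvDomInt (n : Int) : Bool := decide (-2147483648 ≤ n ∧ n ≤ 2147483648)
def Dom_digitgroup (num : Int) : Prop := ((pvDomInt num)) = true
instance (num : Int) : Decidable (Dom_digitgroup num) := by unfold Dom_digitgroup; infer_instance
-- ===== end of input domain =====

-- B splits str(num) into maximal runs of equal characters and checks whether 2 occurs
-- among the run lengths, instead of A's single stateful scan with last_digit/group_len (alternative decomposition).


-- ===== PORT A =====
-- the for-loop over number_str[1:] carrying (last_digit, group_len)
def digitgroupLoop : List Char → Char → Int → Bool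
  | [], _, groupLen => groupLen == 2
  | digit :: rest, lastDigit, groupLen =>
      if digit == lastDigit then digitgroupLoop rest lastDigit (groupLen + 1)
      else if groupLen == 2 then true
      else digitgroupLoop rest digit 1

def digitgroup (num : Int) : Bool :=
  match (PySem.Int.toStr num).toList with
  | [] => false   -- unreachable: str(num) is never empty, so number_str[0] cannot raise
  | c :: rest => digitgroupLoop rest c 1

-- ===== PORT B =====
-- _run_lengths: the while loop computes the longest prefix of s equal to s[0],
-- i.e. 1 + length of takeWhile (== s[0]) over the tail, then recurses on the rest (dropWhile).
def runLengths : List Char → List Nat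
  | [] => []
  | c :: rest =>
      ((rest.takeWhile (· == c)).length + 1) :: runLengths (rest.dropWhile (· == c))
  termination_by l => l.length
  decreasing_by
    simpa using Nat.lt_succ_of_le (List.length_dropWhile_le _ _)

def digitgroup_alt (num : Int) : Bool :=
  (runLengths (PySem.Int.toStr num).toList).contains 2

-- ===== PRECONDITION & SPEC =====
def Spec_digitgroup (num : Int) (out : Bool) : Prop := out = digitgroup_alt num
instance (num : Int) (out : Bool) : Decidable (Spec_digitgroup num out) := by unfold Spec_digitgroup; infer_instance

-- ===== CLAIM (what is proved, stated in full; the proofs are below) =====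
def Claim_equal_digitgroup : Prop := ∀ (num : Int), Dom_digitgroup num → Spec_digitgroup num (digitgroup num)

-- ===== LEMMAS AND PROOFS =====

theorem runLengths_nil : runLengths [] = [] := by
  unfold runLengths; rfl

theorem runLengths_cons (c : Char) (rest : List Char) :
    runLengths (c :: rest) =
      ((rest.takeWhile (· == c)).length + 1) :: runLengths (rest.dropWhile (· == c)) := by
  rw [runLengths]

theorem takeWhile_replicate_append (c : Char) (g : Nat) (l : List Char) :
    (List.replicate g c ++ l).takeWhile (· == c) = List.replicate g c ++ l.takeWhile (· == c) := by
  induction g with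
  | zero => simp
  | succ n ih => simp [List.replicate_succ, ih]

theorem dropWhile_replicate_append (c : Char) (g : Nat) (l : List Char) :
    (List.replicate g c ++ l).dropWhile (· == c) = l.dropWhile (· == c) := by
  induction g with
  | zero => simp
  | succ n ih => simp [List.replicate_succ, ih]

-- invariant: A's scan state (lastDigit, groupLen) corresponds to a pending run of
-- groupLen copies of lastDigit prepended to the unread suffix
theorem loop_eq_runLengths (rest : List Char) :
    ∀ (lastDigit : Char) (g : Nat), 1 ≤ g →
      digitgroupLoop rest lastDigit (g : Int) =
        (runLengths (List.replicate g lastDigit ++ rest)).contains 2 := by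
  induction rest with
  | nil =>
    intro lastDigit g hg
    obtain ⟨g', rfl⟩ : ∃ g', g = g' + 1 := ⟨g - 1, by omega⟩
    rw [List.replicate_succ, List.cons_append, List.append_nil, runLengths_cons]
    simp [digitgroupLoop, runLengths_nil]
    by_cases h1 : g' = 1
    · simp [h1]
    · simp [h1]
      omega
  | cons d t ih =>
    intro lastDigit g hg
    obtain ⟨g', rfl⟩ : ∃ g', g = g' + 1 := ⟨g - 1, by omega⟩
    by_cases hd : d = lastDigit
    · subst hd
      have h1 : digitgroupLoop (d :: t) d ((g' + 1 : Nat) : Int) =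
          digitgroupLoop t d ((g' + 2 : Nat) : Int) := by
        simp [digitgroupLoop]
        congr 1
      rw [h1, ih d (g' + 2) (by omega)]
      have h2 : List.replicate (g' + 2) d ++ t = List.replicate (g' + 1) d ++ d :: t := by
        rw [List.replicate_succ' (n := g' + 1)]; simp
      rw [h2]
    · have hne : (d == lastDigit) = false := by simp [hd]
      have hrl : runLengths (List.replicate (g' + 1) lastDigit ++ d :: t) =
          (g' + 1) :: runLengths (d :: t) := by
        rw [List.replicate_succ, List.cons_append, runLengths_cons,
          takeWhile_replicate_append, dropWhile_replicate_append]
        simp [hne]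
      rw [hrl]
      by_cases h2 : g' + 1 = 2
      · simp [digitgroupLoop, hne, h2]
      · have h3 : digitgroupLoop (d :: t) lastDigit ((g' + 1 : Nat) : Int) =
            digitgroupLoop t d ((1 : Nat) : Int) := by
          simp [digitgroupLoop, hne]
          omega
        rw [h3, ih d 1 (by omega)]
        simp [List.replicate]
        omega

-- ===== VERDICT (by name: the statement is the Claim_ definition above) =====
theorem digitgroup_spec : Claim_equal_digitgroup := by
  intro num _
  unfold Spec_digitgroup digitgroup digitgroup_alt
  cases h : (PySem.Int.toStr num).toList with
  | nil => simp [runLengths_nil]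
  | cons c rest =>
    have := loop_eq_runLengths rest c 1 (by omega)
    simpa [List.replicate] using this
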